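-- pv_equiv track=rewrite | github.com/avinetworks/sdk | python/avi/sdk/utils/f5_converter/f5_config_converter_v10.py | update_with_default_profile
-- ===== SOURCE A (Python) =====
-- import copy
--
-- def update_with_default_profile(profile_type, profile, profile_config):
--     """
--     Profiles can have inheritance used by attribute defaults-from in F5
--     configuration this method recursively gets all the attributes from the
--     default objects and forms complete object
--     :param profile_type: type of profile
--     :param profile: currant profile object
--     :param profile_config: F5 profile config dict
--     :return: Complete profile with updated attributes from defaults
--     """
--     parent_name = profile.get("defaults from", None)
--     if parent_name:
--         parent_profile = profile_config.get(profile_type + " " +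
--                                             parent_name, None)
--         if parent_profile:
--             parent_profile = update_with_default_profile(
--                 profile_type, parent_profile, profile_config)
--             parent_profile = copy.deepcopy(parent_profile)
--             parent_profile.update(profile)
--             profile = parent_profile
--     return profile
-- ===== SOURCE B (Python) =====
-- def _parent_of(profile_type, cur, profile_config):
--     name = cur.get("defaults from")
--     if not name:
--         return None
--     parent = profile_config.get(profile_type + " " + name)
--     if not parent:
--         return None
--     return parent
--
--
-- def update_with_default_profile(profile_type, profile, profile_config):
--     # Iteratively build the whole inheritance chain root-first, then fold it
--     # once into a fresh dict (different decomposition of A's recursion).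
--     chain = [profile]
--     p = _parent_of(profile_type, profile, profile_config)
--     while p is not None:
--         chain.insert(0, p)
--         p = _parent_of(profile_type, p, profile_config)
--     if len(chain) == 1:
--         return profile
--     merged = {}
--     for layer in chain:
--         merged.update(layer)
--     return merged
-- ===== Notes on version B (the rewrite author's own statement) =====
-- stated objective: alternative
-- what changed: Replaces A's top-down recursion (resolve parent recursively, deep-copy, then overlay the child) with an iterative walk that first builds the whole root-first inheritance chain and then folds it once into a fresh empty dict with successive updates; Pre_ excludes cyclic 'defaults from' chains, on which A raises RecursionError.
import Mathlib
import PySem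

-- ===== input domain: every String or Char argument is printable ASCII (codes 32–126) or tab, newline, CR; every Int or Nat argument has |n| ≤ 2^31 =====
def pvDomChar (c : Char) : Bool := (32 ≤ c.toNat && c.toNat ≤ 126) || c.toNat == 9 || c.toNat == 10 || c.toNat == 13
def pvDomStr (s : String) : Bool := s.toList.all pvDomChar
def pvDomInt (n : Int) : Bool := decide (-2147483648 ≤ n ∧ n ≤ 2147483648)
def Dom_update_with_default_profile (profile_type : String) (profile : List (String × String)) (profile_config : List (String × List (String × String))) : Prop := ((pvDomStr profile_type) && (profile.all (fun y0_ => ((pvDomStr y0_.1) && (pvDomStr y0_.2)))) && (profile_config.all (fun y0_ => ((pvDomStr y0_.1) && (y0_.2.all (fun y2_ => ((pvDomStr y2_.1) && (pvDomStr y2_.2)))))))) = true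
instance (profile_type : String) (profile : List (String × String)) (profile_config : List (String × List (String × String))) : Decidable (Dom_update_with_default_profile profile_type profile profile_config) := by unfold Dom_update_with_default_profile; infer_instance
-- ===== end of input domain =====

-- B replaces A's top-down recursion by an iterative walk that first builds the whole
-- root-first inheritance chain and then folds it once into a fresh empty dict
-- (alternative decomposition, same cost); the equivalence is about the RETURN value
-- (A may return the argument object itself, B a fresh dict with the same contents).

-- ===== PORT A =====
-- A's recursion, step for step; the Nat argument is fuel making the recursion total
-- (A raises RecursionError on a cyclic chain; Pre_ excludes those inputs, so the
-- fuel branch is never reached on admitted inputs). Dicts are built with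
-- PySem.Dict.ofList exactly where Python receives the association list as a dict.
def pvAgo (profile_type : String) (profile_config : List (String × List (String × String))) : Nat → List (String × String) → PySem.Dict String String
  | fuel, profile =>
    match (PySem.Dict.ofList profile).get? "defaults from" with
    | none => PySem.Dict.ofList profile
    | some parent_name =>
      if parent_name = "" then PySem.Dict.ofList profile
      else
        match (PySem.Dict.ofList profile_config).get? (profile_type ++ " " ++ parent_name) with
        | none => PySem.Dict.ofList profile
        | some parent_profile =>
          if (PySem.Dict.ofList parent_profile).size = 0 then PySem.Dict.ofList profile
          else
            match fuel with
            | 0 => PySem.Dict.ofList profile  -- unreachable under Pre_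
            | f + 1 =>
              ((pvAgo profile_type profile_config f parent_profile).update
                (PySem.Dict.ofList profile).items)

def update_with_default_profile (profile_type : String) (profile : List (String × String)) (profile_config : List (String × List (String × String))) : List (String × String) :=
  (pvAgo profile_type profile_config profile_config.length profile).items

-- ===== PORT B =====
-- Source B's helper _parent_of: one resolution step of the 'defaults from' link
def pvParent (profile_type : String) (profile_config : List (String × List (String × String))) (cur : List (String × String)) : Option (List (String × String)) :=
  match (PySem.Dict.ofList cur).get? "defaults from" with
  | none => none
  | some name =>
    if name = "" then none
    else
      match (PySem.Dict.ofList profile_config).get? (profile_type ++ " " ++ name) with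
      | none => none
      | some parent => if (PySem.Dict.ofList parent).size = 0 then none else some parent

-- Source B's while-loop building the chain root-first (fuel makes it total; on a cyclic
-- chain Source B loops forever, excluded by Pre_)
def pvChain (profile_type : String) (profile_config : List (String × List (String × String))) : Nat → List (String × String) → List (List (String × String))
  | fuel, cur =>
    match pvParent profile_type profile_config cur with
    | none => [cur]
    | some p =>
      match fuel with
      | 0 => [cur]  -- unreachable under Pre_
      | f + 1 => pvChain profile_type profile_config f p ++ [cur]

def update_with_default_profile_alt (profile_type : String) (profile : List (String × String)) (profile_config : List (String × List (String × String))) : List (String × String) :=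
  let chain := pvChain profile_type profile_config profile_config.length profile
  if chain.length = 1 then (PySem.Dict.ofList profile).items
  else
    (chain.foldl (fun merged layer => merged.update (PySem.Dict.ofList layer).items)
      PySem.Dict.empty).items

-- ===== PRECONDITION & SPEC =====
def pvStops (profile_type : String) (profile_config : List (String × List (String × String))) : Nat → List (String × String) → Bool
  | 0, d => (pvParent profile_type profile_config d).isNone
  | n + 1, d =>
    match pvParent profile_type profile_config d with
    | none => true
    | some p => pvStops profile_type profile_config n p

-- Pre_ excludes exactly the cyclic 'defaults from' chains, on which A raises
-- RecursionError. The condition is on the INPUT's link structure only: the chain of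
-- 'defaults from' links starting at profile reaches an end within profile_config.length
-- resolved parents (an acyclic chain can resolve at most that many distinct parents, so
-- this is precisely acyclicity of the reachable links; any decision procedure for it
-- must follow the links, pvStops does one lookup per link and nothing else).
def Pre_update_with_default_profile (profile_type : String) (profile : List (String × String)) (profile_config : List (String × List (String × String))) : Prop :=
  pvStops profile_type profile_config profile_config.length profile = true
instance (profile_type : String) (profile : List (String × String)) (profile_config : List (String × List (String × String))) : Decidable (Pre_update_with_default_profile profile_type profile profile_config) := by unfold Pre_update_with_default_profile; infer_instance

def pvWitness_update_with_default_profile : String × (List (String × String)) × (List (String × List (String × String))) :=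
  ("ltm profile", [("defaults from", "base"), ("x", "1")], [("ltm profile base", [("y", "2")])])

def Spec_update_with_default_profile (profile_type : String) (profile : List (String × String)) (profile_config : List (String × List (String × String))) (out : List (String × String)) : Prop := out = update_with_default_profile_alt profile_type profile profile_config
instance (profile_type : String) (profile : List (String × String)) (profile_config : List (String × List (String × String))) (out : List (String × String)) : Decidable (Spec_update_with_default_profile profile_type profile profile_config out) := by unfold Spec_update_with_default_profile; infer_instance

-- ===== CLAIM (what is proved, stated in full; the proofs are below) =====
def Claim_equal_update_with_default_profile : Prop := ∀ (profile_type : String) (profile : List (String × String)) (profile_config : List (String × List (String × String))), Dom_update_with_default_profile profile_type profile profile_config → Pre_update_with_default_profile profile_type profile profile_config → Spec_update_with_default_profile profile_type profile profile_config (update_with_default_profile profile_type profile profile_config)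

-- ===== LEMMAS AND PROOFS =====

-- B's fold of the chain, as a Dict-valued function (proof-side only)
def pvBfold (profile_type : String) (profile_config : List (String × List (String × String))) (fuel : Nat) (dl : List (String × String)) : PySem.Dict String String :=
  (pvChain profile_type profile_config fuel dl).foldl
    (fun merged layer => merged.update (PySem.Dict.ofList layer).items) PySem.Dict.empty

-- re-building a dict from its (key-nodup) items gives the same dict
theorem pvOfList_items (dl : List (String × String)) :
    PySem.Dict.ofList ((PySem.Dict.ofList dl).items) = PySem.Dict.ofList dl := by
  apply PySem.Dict.ext
  have hnd : ((PySem.Dict.ofList dl).items.map (·.1)).Nodup := PySem.Dict.nodup_keys_ofList dl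
  rw [show PySem.Dict.ofList ((PySem.Dict.ofList dl).items) = ((PySem.Dict.ofList dl).items).foldl (fun d a => d.insert a.1 a.2) PySem.Dict.empty from rfl]
  rw [PySem.Dict.items_foldl_insert_fresh _ _ _ _ (by intro a _; exact PySem.Dict.contains_empty _) hnd]
  simp [show (PySem.Dict.empty : PySem.Dict String String).items = [] from rfl]

theorem pvUpd_empty (dl : List (String × String)) :
    PySem.Dict.empty.update ((PySem.Dict.ofList dl).items) = PySem.Dict.ofList dl :=
  pvOfList_items dl

-- A's recursion expressed through B's one-step helper pvParent
theorem pvAgo_eq_parent (pt : String) (cfg : List (String × List (String × String))) (fuel : Nat) (dl : List (String × String)) :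
    pvAgo pt cfg fuel dl =
      match pvParent pt cfg dl with
      | none => PySem.Dict.ofList dl
      | some pl =>
        match fuel with
        | 0 => PySem.Dict.ofList dl
        | f + 1 => (pvAgo pt cfg f pl).update (PySem.Dict.ofList dl).items := by
  rw [pvAgo, pvParent]
  rcases h : (PySem.Dict.ofList dl).get? "defaults from" with _ | pn
  · cases fuel <;> rfl
  · by_cases hpn : pn = ""
    · cases fuel <;> simp [hpn]
    · simp only [if_neg hpn]
      rcases h2 : (PySem.Dict.ofList cfg).get? (pt ++ " " ++ pn) with _ | pl
      · cases fuel <;> rfl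
      · by_cases hsz : (PySem.Dict.ofList pl).size = 0
        · simp only [if_pos hsz]
        · simp only [if_neg hsz]

theorem pvBfold_step (pt : String) (cfg : List (String × List (String × String))) (f : Nat) (dl pl : List (String × String)) (h : pvParent pt cfg dl = some pl) :
    pvBfold pt cfg (f + 1) dl = (pvBfold pt cfg f pl).update (PySem.Dict.ofList dl).items := by
  rw [pvBfold, pvChain, h, List.foldl_append]
  rfl

theorem pvBfold_stop (pt : String) (cfg : List (String × List (String × String))) (fuel : Nat) (dl : List (String × String)) (h : pvParent pt cfg dl = none) :
    pvBfold pt cfg fuel dl = PySem.Dict.ofList dl := by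
  rw [pvBfold, pvChain, h]
  cases fuel <;> exact pvUpd_empty dl

theorem pvAgo_eq_pvBfold (pt : String) (cfg : List (String × List (String × String))) :
    ∀ (fuel : Nat) (dl : List (String × String)),
      pvStops pt cfg fuel dl = true → pvAgo pt cfg fuel dl = pvBfold pt cfg fuel dl := by
  intro fuel
  induction fuel with
  | zero =>
    intro dl hs
    rw [pvStops] at hs
    rcases h : pvParent pt cfg dl with _ | pl
    · rw [pvBfold_stop pt cfg 0 dl h, pvAgo_eq_parent, h]
    · rw [h] at hs; simp [Option.isNone] at hs
  | succ f ih =>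
    intro dl hs
    rw [pvStops] at hs
    rcases h : pvParent pt cfg dl with _ | pl
    · rw [pvBfold_stop pt cfg (f + 1) dl h, pvAgo_eq_parent, h]
    · rw [h] at hs
      rw [pvAgo_eq_parent, h]
      show (pvAgo pt cfg f pl).update (PySem.Dict.ofList dl).items = _
      rw [ih pl hs, pvBfold_step pt cfg f dl pl h]

theorem pvChain_ne_nil (pt : String) (cfg : List (String × List (String × String))) (fuel : Nat) (dl : List (String × String)) :
    pvChain pt cfg fuel dl ≠ [] := by
  rw [pvChain]
  rcases pvParent pt cfg dl with _ | p
  · simp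
  · cases fuel <;> simp

theorem pvChain_len1 (pt : String) (cfg : List (String × List (String × String))) (fuel : Nat) (dl : List (String × String)) (hl : (pvChain pt cfg fuel dl).length = 1) :
    pvChain pt cfg fuel dl = [dl] := by
  rw [pvChain] at hl ⊢
  rcases h : pvParent pt cfg dl with _ | p
  · rfl
  · simp only [h] at hl ⊢
    cases fuel with
    | zero => rfl
    | succ f =>
      exfalso
      have := pvChain_ne_nil pt cfg f p
      simp only [List.length_append, List.length_singleton] at hl
      have : (pvChain pt cfg f p).length ≠ 0 := by
        intro h0; exact this (List.eq_nil_of_length_eq_zero h0)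
      omega

theorem alt_eq_pvBfold (pt : String) (prof : List (String × String)) (cfg : List (String × List (String × String))) :
    update_with_default_profile_alt pt prof cfg = (pvBfold pt cfg cfg.length prof).items := by
  rw [update_with_default_profile_alt]
  by_cases hl : (pvChain pt cfg cfg.length prof).length = 1
  · simp only [hl, if_true]
    rw [pvBfold, pvChain_len1 pt cfg cfg.length prof hl]
    rw [show ([prof].foldl (fun merged layer => merged.update (PySem.Dict.ofList layer).items) PySem.Dict.empty) = PySem.Dict.empty.update ((PySem.Dict.ofList prof).items) from rfl, pvUpd_empty]
  · simp only [hl, if_false]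
    rfl

-- ===== VERDICT (by name: the statement is the Claim_ definition above) =====
theorem update_with_default_profile_spec : Claim_equal_update_with_default_profile := by
  intro pt prof cfg _ hpre
  unfold Spec_update_with_default_profile update_with_default_profile
  rw [alt_eq_pvBfold, pvAgo_eq_pvBfold pt cfg cfg.length prof hpre]
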